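-- pv_equiv track=rewrite | github.com/sankeerth/Algorithms | Greedy/python/leetcode/put_boxes_into_the_warehouse_i.py | maxBoxesInWarehouse
-- ===== SOURCE A (Python) =====
-- from typing import List
--
-- def maxBoxesInWarehouse(boxes: List[int], warehouse: List[int]) -> int:
--     maxAllowedInRoom = [0] * len(warehouse)
--     maxAllowedInRoom[0] = warehouse[0]
--     boxes.sort()
--
--     for i in range(1, len(warehouse)):
--         maxAllowedInRoom[i] = min(maxAllowedInRoom[i-1], warehouse[i])
--
--     box, room = 0, len(warehouse)-1 # pointers
--
--     while room >= 0 and box < len(boxes):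
--         if boxes[box] <= maxAllowedInRoom[room]:
--             box += 1
--         room -= 1
--
--     return box
-- ===== SOURCE B (Python) =====
-- from typing import List
--
-- def maxBoxesInWarehouse(boxes: List[int], warehouse: List[int]) -> int:
--     boxes.sort()
--     min_h = warehouse[0]
--     count = 0
--     i = len(boxes) - 1
--     for h in warehouse:
--         if h < min_h:
--             min_h = h
--         while i >= 0 and boxes[i] > min_h:
--             i -= 1
--         if i >= 0:
--             count += 1
--             i -= 1
--     return count
-- ===== Notes on version B (the rewrite author's own statement) =====
-- stated objective: alternative
-- what changed: B drops A's separately-built prefix-min array and right-to-left smallest-box two-pointer: it fuses the running minimum into a single left-to-right pass over the rooms, placing the largest still-fitting box (pointer walking backward over the sorted boxes) in each room.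
import Mathlib
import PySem

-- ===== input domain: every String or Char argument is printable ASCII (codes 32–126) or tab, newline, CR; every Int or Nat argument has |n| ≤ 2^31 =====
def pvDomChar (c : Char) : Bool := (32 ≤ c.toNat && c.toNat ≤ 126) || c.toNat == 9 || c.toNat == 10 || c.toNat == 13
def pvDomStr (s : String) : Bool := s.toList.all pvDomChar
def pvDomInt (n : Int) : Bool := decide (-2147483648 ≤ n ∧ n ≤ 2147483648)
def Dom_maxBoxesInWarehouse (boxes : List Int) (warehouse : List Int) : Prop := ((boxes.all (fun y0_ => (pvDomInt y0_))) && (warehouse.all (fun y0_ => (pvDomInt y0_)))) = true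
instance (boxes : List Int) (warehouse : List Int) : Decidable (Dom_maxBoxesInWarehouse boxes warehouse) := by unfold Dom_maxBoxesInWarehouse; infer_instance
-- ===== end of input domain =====

-- B replaces A's prefix-min array + right-to-left smallest-box two-pointer by one left-to-right pass
-- over the rooms with a fused running minimum, placing the largest still-fitting box per room
-- (objective: alternative decomposition). Both Pythons sort `boxes` in place; equivalence is about
-- the return value (the mutation is identical).

-- ===== PORT A =====
-- for-loop building maxAllowedInRoom[1..]: prev = maxAllowedInRoom[i-1]
def pvPmAux (prev : Int) : List Int → List Int
  | [] => []
  | h :: t => let m := min prev h; m :: pvPmAux m t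

-- the while loop: caps in room-descending order, remaining sorted boxes, accumulator = box
def pvALoop : List Int → List Int → Int → Int
  | [], _, box => box
  | _ :: _, [], box => box
  | c :: cs, b :: bs, box => if b ≤ c then pvALoop cs bs (box + 1) else pvALoop cs (b :: bs) box

def maxBoxesInWarehouse (boxes : List Int) (warehouse : List Int) : Int :=
  match warehouse with
  | [] => 0  -- unreachable under Pre_: Python raises IndexError on warehouse[0]
  | w0 :: ws =>
    let maxAllowedInRoom := w0 :: pvPmAux w0 ws
    pvALoop maxAllowedInRoom.reverse (PySem.List.sorted boxes (fun x => x) false) 0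

-- ===== PORT B =====
-- the inner while: advance i while boxes[i] > min_h (remaining boxes kept largest-first)
def pvSkip (m : Int) : List Int → List Int
  | [] => []
  | b :: t => if m < b then pvSkip m t else b :: t

-- the for-loop over warehouse: state (min_h, remaining boxes largest-first, count)
def pvBLoop : List Int → Int → List Int → Int → Int
  | [], _, _, count => count
  | h :: ws, minh, rem, count =>
    let m := if h < minh then h else minh
    match pvSkip m rem with
    | [] => pvBLoop ws m [] count
    | _ :: rest => pvBLoop ws m rest (count + 1)

def maxBoxesInWarehouse_alt (boxes : List Int) (warehouse : List Int) : Int :=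
  match warehouse with
  | [] => 0  -- unreachable under Pre_: Python raises IndexError on warehouse[0]
  | w0 :: _ =>
    pvBLoop warehouse w0 (PySem.List.sorted boxes (fun x => x) false).reverse 0

-- ===== PRECONDITION & SPEC =====
-- Pre_ excludes only the empty warehouse, on which both Pythons raise IndexError (warehouse[0]).
def Pre_maxBoxesInWarehouse (boxes : List Int) (warehouse : List Int) : Prop := warehouse ≠ []
instance (boxes : List Int) (warehouse : List Int) : Decidable (Pre_maxBoxesInWarehouse boxes warehouse) := by unfold Pre_maxBoxesInWarehouse; infer_instance
def pvWitness_maxBoxesInWarehouse : List Int × List Int := ([4, 1, 3], [5, 3, 2])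

def Spec_maxBoxesInWarehouse (boxes : List Int) (warehouse : List Int) (out : Int) : Prop := out = maxBoxesInWarehouse_alt boxes warehouse
instance (boxes : List Int) (warehouse : List Int) (out : Int) : Decidable (Spec_maxBoxesInWarehouse boxes warehouse out) := by unfold Spec_maxBoxesInWarehouse; infer_instance

-- ===== CLAIM (what is proved, stated in full; the proofs are below) =====
def Claim_equal_maxBoxesInWarehouse : Prop := ∀ (boxes : List Int) (warehouse : List Int), Dom_maxBoxesInWarehouse boxes warehouse → Pre_maxBoxesInWarehouse boxes warehouse → Spec_maxBoxesInWarehouse boxes warehouse (maxBoxesInWarehouse boxes warehouse)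

-- ===== LEMMAS AND PROOFS =====

-- accumulator-free version of A's while loop
def pvGA : List Int → List Int → Int
  | [], _ => 0
  | _ :: _, [] => 0
  | c :: cs, b :: bs => if b ≤ c then 1 + pvGA cs bs else pvGA cs (b :: bs)

lemma pvALoop_acc (cs bs : List Int) (k : Int) : pvALoop cs bs k = k + pvGA cs bs := by
  induction cs generalizing bs k with
  | nil => simp [pvALoop, pvGA]
  | cons c cs ih =>
    cases bs with
    | nil => simp [pvALoop, pvGA]
    | cons b bs =>
      simp only [pvALoop, pvGA]
      split_ifs with h
      · rw [ih]; ring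
      · rw [ih]

-- accumulator-free version of B's for loop (caps precomputed)
def pvGB : List Int → List Int → Int
  | [], _ => 0
  | c :: cs, rem =>
    match pvSkip c rem with
    | [] => pvGB cs []
    | _ :: rest => 1 + pvGB cs rest

lemma pvBLoop_acc (ws : List Int) (minh : Int) (rem : List Int) (k : Int) :
    pvBLoop ws minh rem k = k + pvGB (pvPmAux minh ws) rem := by
  induction ws generalizing minh rem k with
  | nil => simp [pvBLoop, pvGB, pvPmAux]
  | cons h t ih =>
    simp only [pvBLoop, pvPmAux, pvGB]
    have hm : (if h < minh then h else minh) = min minh h := by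
      rw [min_def]; split_ifs <;> omega
    rw [hm]
    cases hs : pvSkip (min minh h) rem with
    | nil => simp only [ih]
    | cons x rest => simp only [ih]; ring

lemma pvGB_nil (cs : List Int) : pvGB cs [] = 0 := by
  induction cs with
  | nil => rfl
  | cons c cs ih => simp [pvGB, pvSkip, ih]

lemma pvGA_nil (cs : List Int) : pvGA cs [] = 0 := by
  cases cs <;> rfl

lemma pvPmAux_mem_le (cur : Int) (ws : List Int) : ∀ x ∈ pvPmAux cur ws, x ≤ cur := by
  induction ws generalizing cur with
  | nil => simp [pvPmAux]
  | cons h t ih =>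
    intro x hx
    simp only [pvPmAux, List.mem_cons] at hx
    rcases hx with rfl | hx
    · exact min_le_left _ _
    · exact le_trans (ih _ x hx) (min_le_left _ _)

-- exchange lemma: appending a cap c ≥ every other cap, A's greedy matches the largest box ≤ c to it
lemma pvGA_snoc (u : List Int) (c : Int) (v : List Int) (hc : ∀ a ∈ u, a ≤ c) :
    pvGA (u ++ [c]) v =
      (if (v.takeWhile (fun b => b ≤ c)) = [] then 0
       else 1 + pvGA u (v.takeWhile (fun b => b ≤ c)).dropLast) := by
  induction u generalizing v with
  | nil =>
    cases v with
    | nil => simp [pvGA]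
    | cons b bs =>
      simp only [List.nil_append, pvGA, List.takeWhile]
      by_cases hb : b ≤ c
      · simp only [hb, decide_true, if_true]
        cases htw : bs.takeWhile (fun b => b ≤ c) with
        | nil => simp
        | cons x xs => simp
      · simp [hb]
  | cons a u ih =>
    have hac : a ≤ c := hc a (List.mem_cons_self)
    have hc' : ∀ x ∈ u, x ≤ c := fun x hx => hc x (List.mem_cons_of_mem _ hx)
    cases v with
    | nil => simp [pvGA]
    | cons b bs =>
      simp only [List.cons_append, pvGA]
      by_cases hba : b ≤ a
      · have hbc : b ≤ c := le_trans hba hac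
        rw [if_pos hba, ih bs hc']
        simp only [List.takeWhile, hbc, decide_true]
        cases htw : bs.takeWhile (fun b => b ≤ c) with
        | nil => simp [pvGA_nil]
        | cons x xs =>
          have hd : (b :: x :: xs).dropLast = b :: (x :: xs).dropLast := rfl
          have h2 : pvGA (a :: u) (b :: (x :: xs).dropLast) = 1 + pvGA u (x :: xs).dropLast := by
            simp [pvGA, hba]
          simp only [reduceCtorEq, if_false, hd, h2]
      · rw [if_neg hba, ih (b :: bs) hc']
        simp only [List.takeWhile]
        by_cases hbc : b ≤ c
        · simp only [hbc, decide_true]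
          cases htw : bs.takeWhile (fun b => b ≤ c) with
          | nil => simp [pvGA_nil]
          | cons x xs =>
            have hd : (b :: x :: xs).dropLast = b :: (x :: xs).dropLast := rfl
            have h2 : pvGA (a :: u) (b :: (x :: xs).dropLast) = pvGA u (b :: (x :: xs).dropLast) := by
              simp [pvGA, hba]
            simp only [reduceCtorEq, if_false, hd, h2]
        · simp [hbc]

-- pvSkip on the reverse of an ascending list keeps exactly the ≤ c prefix, reversed
lemma pvSkip_reverse (c : Int) (v : List Int) (hv : v.Pairwise (· ≤ ·)) :
    pvSkip c v.reverse = (v.takeWhile (fun b => b ≤ c)).reverse := by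
  induction v using List.reverseRecOn with
  | nil => simp [pvSkip]
  | append_singleton t x ih =>
    have ht : t.Pairwise (· ≤ ·) := hv.sublist (List.sublist_append_left _ _)
    have hx : ∀ y ∈ t, y ≤ x := by
      intro y hy
      have := List.pairwise_append.mp hv
      exact this.2.2 y hy x (List.mem_singleton_self x)
    simp only [List.reverse_append, List.reverse_singleton, List.singleton_append, pvSkip]
    by_cases hcx : c < x
    · rw [if_pos hcx, ih ht]
      have : (t ++ [x]).takeWhile (fun b => b ≤ c) = t.takeWhile (fun b => b ≤ c) := by
        rw [List.takeWhile_append]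
        split_ifs with h
        · have hall : t.takeWhile (fun b => b ≤ c) = t :=
            (List.takeWhile_sublist _).eq_of_length h
          rw [hall]
          simp [show ¬ (x ≤ c) by omega]
        · rfl
      rw [this]
    · rw [if_neg hcx]
      have hall : (t ++ [x]).takeWhile (fun b => b ≤ c) = t ++ [x] := by
        rw [List.takeWhile_eq_self_iff]
        intro y hy
        rcases List.mem_append.mp hy with hy | hy
        · have : y ≤ x := hx y hy
          simp; omega
        · simp at hy; subst hy; simp; omega
      rw [hall]; simp
lemma pvMain (ws : List Int) : ∀ (cur : Int) (v : List Int), v.Pairwise (· ≤ ·) →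
    pvGA (pvPmAux cur ws).reverse v = pvGB (pvPmAux cur ws) v.reverse := by
  induction ws with
  | nil => intro cur v _; simp [pvPmAux, pvGA, pvGB]
  | cons h t ih =>
    intro cur v hv
    simp only [pvPmAux, List.reverse_cons, pvGB]
    set m := min cur h with hm
    have hc : ∀ a ∈ (pvPmAux m t).reverse, a ≤ m := by
      intro a ha; exact pvPmAux_mem_le m t a (List.mem_reverse.mp ha)
    rw [pvGA_snoc _ m v hc, pvSkip_reverse m v hv]
    cases htw : v.takeWhile (fun b => b ≤ m) with
    | nil => simp [pvGB_nil]
    | cons x xs =>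
      have hne : (x :: xs) ≠ [] := by simp
      have hsplit : (x :: xs).reverse = (x :: xs).getLast hne :: (x :: xs).dropLast.reverse := by
        conv_lhs => rw [← List.dropLast_append_getLast hne]
        simp
      simp only [reduceCtorEq, if_false, hsplit]
      have hdl : ((x :: xs).dropLast).Pairwise (· ≤ ·) := by
        have h1 : (v.takeWhile (fun b => b ≤ m)).Pairwise (· ≤ ·) :=
          hv.sublist (List.takeWhile_sublist _)
        rw [htw] at h1
        exact h1.sublist (List.dropLast_sublist _)
      rw [ih m ((x :: xs).dropLast) hdl]

lemma pvPmAux_self (w0 : Int) (ws : List Int) :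
    pvPmAux w0 (w0 :: ws) = w0 :: pvPmAux w0 ws := by
  simp [pvPmAux]

-- ===== VERDICT (by name: the statement is the Claim_ definition above) =====
theorem maxBoxesInWarehouse_spec : Claim_equal_maxBoxesInWarehouse := by
  intro boxes warehouse _ hpre
  unfold Spec_maxBoxesInWarehouse maxBoxesInWarehouse maxBoxesInWarehouse_alt
  cases warehouse with
  | nil => exact absurd rfl hpre
  | cons w0 ws =>
    simp only
    rw [pvALoop_acc, pvBLoop_acc, pvPmAux_self]
    have hs : (PySem.List.sorted boxes (fun x => x) false).Pairwise (· ≤ ·) :=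
      PySem.List.sorted_pairwise boxes (fun x => x)
    have := pvMain (w0 :: ws) w0 (PySem.List.sorted boxes (fun x => x) false) hs
    rw [pvPmAux_self] at this
    rw [this]
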